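-- pv_equiv track=rewrite | github.com/DonatasNoreika/python_new_material_answers | Lesson 11/task1.py | puzzle_pieces
-- ===== SOURCE A (Python) =====
-- def puzzle_pieces(list1: list, list2: list) -> bool:
--     if len(list1) != len(list2):
--         return False
--
--     sum_value = None
--     for i in range(len(list1)):
--         if sum_value is None:
--             sum_value = list1[i] + list2[i]
--         elif list1[i] + list2[i] != sum_value:
--             return False
--
--     return True
-- ===== SOURCE B (Python) =====
-- def puzzle_pieces(list1: list, list2: list) -> bool:
--     if len(list1) != len(list2):
--         return False
--     d1 = [y - x for x, y in zip(list1, list1[1:])]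
--     d2 = [y - x for x, y in zip(list2, list2[1:])]
--     return d1 == [-d for d in d2]
-- ===== Notes on version B (the rewrite author's own statement) =====
-- stated objective: alternative
-- what changed: Instead of comparing each element-wise sum against a running first-sum accumulator with early exit, B never computes any sum: it builds the consecutive-difference sequences of both lists and checks that list1's deltas equal the negation of list2's deltas (sums are constant iff a[i+1]-a[i] = -(b[i+1]-b[i]) for all i).
import Mathlib
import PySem

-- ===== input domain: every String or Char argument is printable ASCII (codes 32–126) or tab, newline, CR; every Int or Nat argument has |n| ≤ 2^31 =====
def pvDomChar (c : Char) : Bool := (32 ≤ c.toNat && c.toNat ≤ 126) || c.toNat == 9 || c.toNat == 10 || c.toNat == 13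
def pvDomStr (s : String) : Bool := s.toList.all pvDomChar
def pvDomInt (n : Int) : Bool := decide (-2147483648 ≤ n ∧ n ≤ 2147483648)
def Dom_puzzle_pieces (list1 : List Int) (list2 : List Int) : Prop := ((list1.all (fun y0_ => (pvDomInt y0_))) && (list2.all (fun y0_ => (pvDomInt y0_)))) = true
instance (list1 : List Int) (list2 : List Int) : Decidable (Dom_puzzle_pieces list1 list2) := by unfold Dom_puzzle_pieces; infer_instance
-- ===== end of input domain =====

-- B never computes element-wise sums: it compares the consecutive-difference sequence of
-- list1 with the negated difference sequence of list2 (alternative algorithm, same cost).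


-- ===== PORT A =====
-- A's for-loop over i in range(len(list1)), reading list1[i] and list2[i], runs only when
-- the lengths are equal; it is transcribed as structural recursion over the zip, carrying
-- the same Option-valued sum_value state with the same early return.
def pp_loop : List (Int × Int) → Option Int → Bool
  | [], _ => true
  | (a, b) :: rest, none => pp_loop rest (some (a + b))
  | (a, b) :: rest, some s => if a + b ≠ s then false else pp_loop rest (some s)

def puzzle_pieces (list1 : List Int) (list2 : List Int) : Bool :=
  if list1.length ≠ list2.length then false
  else pp_loop (list1.zip list2) none

-- ===== PORT B =====
-- Source B's `[y - x for x, y in zip(xs, xs[1:])]`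
def pp_deltas (xs : List Int) : List Int := (xs.zip xs.tail).map (fun p => p.2 - p.1)

def puzzle_pieces_alt (list1 : List Int) (list2 : List Int) : Bool :=
  if list1.length ≠ list2.length then false
  else decide (pp_deltas list1 = (pp_deltas list2).map (fun d => -d))

-- ===== PRECONDITION & SPEC =====
def Spec_puzzle_pieces (list1 : List Int) (list2 : List Int) (out : Bool) : Prop := out = puzzle_pieces_alt list1 list2
instance (list1 : List Int) (list2 : List Int) (out : Bool) : Decidable (Spec_puzzle_pieces list1 list2 out) := by unfold Spec_puzzle_pieces; infer_instance

-- ===== CLAIM (what is proved, stated in full; the proofs are below) =====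
def Claim_equal_puzzle_pieces : Prop := ∀ (list1 : List Int) (list2 : List Int), Dom_puzzle_pieces list1 list2 → Spec_puzzle_pieces list1 list2 (puzzle_pieces list1 list2)

-- ===== LEMMAS AND PROOFS =====

theorem pp_loop_some (L : List (Int × Int)) (s : Int) :
    pp_loop L (some s) = decide (∀ p ∈ L, p.1 + p.2 = s) := by
  induction L with
  | nil => simp [pp_loop]
  | cons hd tl ih =>
    obtain ⟨a, b⟩ := hd
    by_cases h : a + b = s
    · simp [pp_loop, h, ih]
    · simp [pp_loop, h]

theorem sums_iff_deltas : ∀ (t1 t2 : List Int) (a b : Int), t1.length = t2.length →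
    ((∀ p ∈ t1.zip t2, p.1 + p.2 = a + b) ↔
      pp_deltas (a :: t1) = (pp_deltas (b :: t2)).map (fun d => -d)) := by
  intro t1
  induction t1 with
  | nil =>
    intro t2 a b hlen
    have : t2 = [] := List.length_eq_zero_iff.mp hlen.symm
    subst this
    simp [pp_deltas]
  | cons c t1' ih =>
    intro t2 a b hlen
    cases t2 with
    | nil => simp at hlen
    | cons d t2' =>
      have hlen' : t1'.length = t2'.length := by simpa using hlen
      have hih := ih t2' c d hlen'
      simp only [pp_deltas, List.tail_cons, List.zip_cons_cons, List.map_cons,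
        List.cons.injEq] at hih ⊢
      constructor
      · intro h
        have h0 : c + d = a + b := h (c, d) (by simp)
        refine ⟨by omega, ?_⟩
        exact hih.mp (fun p hp => by have := h p (by simp [hp]); omega)
      · rintro ⟨h0, hrest⟩
        have h0' : c + d = a + b := by omega
        intro p hp
        rcases List.mem_cons.mp hp with rfl | hp'
        · exact h0'
        · have := hih.mpr hrest p hp'; omega

-- ===== VERDICT (by name: the statement is the Claim_ definition above) =====
theorem puzzle_pieces_spec : Claim_equal_puzzle_pieces := by
  intro list1 list2 _
  unfold Spec_puzzle_pieces puzzle_pieces puzzle_pieces_alt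
  by_cases hlen : list1.length = list2.length
  · simp only [hlen, ne_eq, not_true_eq_false, if_false]
    cases list1 with
    | nil =>
      have : list2 = [] := List.length_eq_zero_iff.mp hlen.symm
      subst this
      simp [pp_loop, pp_deltas]
    | cons a t1 =>
      cases list2 with
      | nil => simp at hlen
      | cons b t2 =>
        have hlen' : t1.length = t2.length := by simpa using hlen
        simp only [List.zip_cons_cons, pp_loop, pp_loop_some]
        rw [decide_eq_decide]
        exact sums_iff_deltas t1 t2 a b hlen'
  · simp [hlen]
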